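-- pv_equiv track=rewrite | github.com/StellarSeal/PythonFPT | 18_02_25/xor_divisors.py | xor_divisors
-- ===== SOURCE A (Python) =====
-- def xor_divisors(a, b):
--     divisors = []
--     for i in range(1, (a + 1)):
--         if a % i == 0:
--             divisors.append(i)
--     for j in range(1, (b + 1)):
--         if b % j == 0:
--             divisors.append(j)
--     xor_divisors = []
--     for d in divisors:
--         if ((a % d == 0) and (b % d != 0)) or ((a % d != 0) and (b % d == 0)):
--             xor_divisors.append(d)
--     return xor_divisors
-- ===== SOURCE B (Python) =====
-- def _divisors(n):
--     # ascending divisors of n via trial division up to sqrt(n); empty for n <= 0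
--     small = []
--     large = []
--     i = 1
--     while i * i <= n:
--         if n % i == 0:
--             small.append(i)
--             q = n // i
--             if q != i:
--                 large.append(q)
--         i += 1
--     return small + large[::-1]
--
--
-- def xor_divisors(a, b):
--     return [d for d in _divisors(a) if b % d != 0] + \
--            [d for d in _divisors(b) if a % d != 0]
-- ===== Notes on version B (the rewrite author's own statement) =====
-- stated objective: faster
-- what changed: B enumerates each number's divisors by trial division only up to sqrt(n), pairing each small divisor i with its cofactor n//i (appended in reverse to keep ascending order), instead of scanning every integer up to n; the XOR filter then only tests the complementary number.
import Mathlib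
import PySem

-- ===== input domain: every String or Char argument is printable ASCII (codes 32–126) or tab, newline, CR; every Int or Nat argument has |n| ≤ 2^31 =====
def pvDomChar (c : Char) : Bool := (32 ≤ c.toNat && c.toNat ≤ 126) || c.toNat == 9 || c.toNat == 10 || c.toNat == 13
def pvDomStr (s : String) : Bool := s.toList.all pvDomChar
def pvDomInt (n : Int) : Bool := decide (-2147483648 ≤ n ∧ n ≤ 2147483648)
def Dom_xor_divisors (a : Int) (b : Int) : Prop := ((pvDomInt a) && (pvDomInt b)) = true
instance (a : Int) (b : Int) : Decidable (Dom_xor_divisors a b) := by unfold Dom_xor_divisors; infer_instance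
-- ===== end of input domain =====

-- B replaces A's O(a+b) scans by trial division up to sqrt(n) with cofactor pairing (asymptotically faster).

-- ===== PORT A =====
def xor_divisors (a : Int) (b : Int) : List Int :=
  let divisors : List Int :=
    (PySem.List.pyRange 1 (a + 1)).foldl
      (fun acc i => if PySem.Int.mod a i == 0 then acc ++ [i] else acc) []
  let divisors :=
    (PySem.List.pyRange 1 (b + 1)).foldl
      (fun acc j => if PySem.Int.mod b j == 0 then acc ++ [j] else acc) divisors
  divisors.foldl
    (fun acc d =>
      if ((PySem.Int.mod a d == 0) && (PySem.Int.mod b d != 0)) ||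
         ((PySem.Int.mod a d != 0) && (PySem.Int.mod b d == 0)) then acc ++ [d] else acc) []

-- ===== PORT B =====
-- while i*i <= n loop of Source B's _divisors
def divisorsAux (n : Int) (i : Int) (small : List Int) (large : List Int) : List Int × List Int :=
  if hg : i * i ≤ n then
    if PySem.Int.mod n i == 0 then
      divisorsAux n (i + 1) (small ++ [i])
        (if PySem.Int.floordiv n i != i then large ++ [PySem.Int.floordiv n i] else large)
    else
      divisorsAux n (i + 1) small large
  else (small, large)
termination_by (n + 1 - i).toNat
decreasing_by
  all_goals
    have hii : i ≤ i * i := by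
      by_cases h' : i ≤ 0
      · nlinarith [mul_self_nonneg i]
      · nlinarith
    omega

def pyDivisors (n : Int) : List Int :=
  let p := divisorsAux n 1 [] []
  p.1 ++ p.2.reverse

def xor_divisors_alt (a : Int) (b : Int) : List Int :=
  (pyDivisors a).filter (fun d => PySem.Int.mod b d != 0) ++
  (pyDivisors b).filter (fun d => PySem.Int.mod a d != 0)

-- ===== PRECONDITION & SPEC =====
def Spec_xor_divisors (a : Int) (b : Int) (out : List Int) : Prop := out = xor_divisors_alt a b
instance (a : Int) (b : Int) (out : List Int) : Decidable (Spec_xor_divisors a b out) := by unfold Spec_xor_divisors; infer_instance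

-- ===== CLAIM (what is proved, stated in full; the proofs are below) =====
def Claim_equal_xor_divisors : Prop := ∀ (a : Int) (b : Int), Dom_xor_divisors a b → Spec_xor_divisors a b (xor_divisors a b)

-- ===== LEMMAS AND PROOFS =====

-- the naive ascending divisor list A builds for each argument
def ndiv (n : Int) : List Int :=
  (PySem.List.pyRange 1 (n + 1)).filter (fun d => PySem.Int.mod n d == 0)

lemma le_sqrt_iff {i n : Int} (hi : 1 ≤ i) : i ≤ Int.sqrt n ↔ i * i ≤ n := by
  by_cases hn : n ≤ 0
  · constructor
    · intro h
      exfalso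
      have h0 : Int.sqrt n = 0 := by
        unfold Int.sqrt
        rw [Int.toNat_of_nonpos hn]; simp
      omega
    · intro h; nlinarith
  · push Not at hn
    obtain ⟨m, rfl⟩ : ∃ m : Nat, n = (m : Int) := ⟨n.toNat, by omega⟩
    rw [Int.sqrt_natCast]
    obtain ⟨j, rfl⟩ : ∃ j : Nat, i = (j : Int) := ⟨i.toNat, by omega⟩
    rw [show ((j : Int) ≤ (Nat.sqrt m : Int)) ↔ j ≤ Nat.sqrt m from Int.ofNat_le,
        Nat.le_sqrt]
    exact_mod_cast Iff.rfl

lemma sqrt_sq_le {n : Int} (hn : 0 ≤ n) : Int.sqrt n * Int.sqrt n ≤ n := by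
  obtain ⟨m, rfl⟩ : ∃ m : Nat, n = (m : Int) := ⟨n.toNat, by omega⟩
  rw [Int.sqrt_natCast]
  have h := Nat.sqrt_le' m
  rw [pow_two] at h
  exact_mod_cast h

lemma lt_sqrt_succ_sq {n : Int} (hn : 0 ≤ n) : n < (Int.sqrt n + 1) * (Int.sqrt n + 1) := by
  obtain ⟨m, rfl⟩ : ∃ m : Nat, n = (m : Int) := ⟨n.toNat, by omega⟩
  rw [Int.sqrt_natCast]
  have h := Nat.lt_succ_sqrt' m
  rw [pow_two, Nat.succ_eq_add_one] at h
  exact_mod_cast h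

lemma divisorsAux_spec (n : Int) :
    ∀ (k : Nat) (i : Int), (n + 1 - i).toNat ≤ k → 1 ≤ i → ∀ (small large : List Int),
      divisorsAux n i small large =
        (small ++ (PySem.List.pyRange i (Int.sqrt n + 1)).filter (fun d => PySem.Int.mod n d == 0),
         large ++ ((PySem.List.pyRange i (Int.sqrt n + 1)).filter
             (fun d => PySem.Int.mod n d == 0 && PySem.Int.floordiv n d != d)).map
           (fun d => PySem.Int.floordiv n d)) := by
  intro k
  induction k with
  | zero =>
    intro i hk hi small large
    have hg : ¬ (i * i ≤ n) := by
      intro h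
      have hii : i ≤ i * i := by nlinarith
      omega
    rw [divisorsAux, dif_neg hg]
    have hs : Int.sqrt n + 1 ≤ i := by
      by_contra h
      push Not at h
      exact hg ((le_sqrt_iff hi).mp (by omega))
    rw [PySem.List.pyRange_one_eq_nil hs]
    simp
  | succ k ih =>
    intro i hk hi small large
    rw [divisorsAux]
    by_cases hg : i * i ≤ n
    · rw [dif_pos hg]
      have hii : i ≤ i * i := by nlinarith
      have hin : i ≤ n := by omega
      have hle : i ≤ Int.sqrt n := (le_sqrt_iff hi).mpr hg
      rw [PySem.List.pyRange_one_cons (by omega : i < Int.sqrt n + 1)]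
      by_cases hm : PySem.Int.mod n i = 0
      · rw [if_pos (by simp [hm])]
        rw [ih (i + 1) (by omega) (by omega)]
        by_cases hq : PySem.Int.floordiv n i = i
        · rw [if_neg (by simp [hq])]
          simp [hm, hq]
        · rw [if_pos (by simp [hq])]
          simp [hm, hq]
      · rw [if_neg (by simp [hm])]
        rw [ih (i + 1) (by omega) (by omega)]
        simp [hm]
    · rw [dif_neg hg]
      have hs : Int.sqrt n + 1 ≤ i := by
        by_contra h
        push Not at h
        exact hg ((le_sqrt_iff hi).mp (by omega))
      rw [PySem.List.pyRange_one_eq_nil hs]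
      simp

lemma mem_ndiv {n x : Int} : x ∈ ndiv n ↔ (1 ≤ x ∧ x < n + 1) ∧ x ∣ n := by
  simp [ndiv, List.mem_filter, PySem.List.mem_pyRange_one, PySem.Int.mod_eq_zero_iff_dvd]

-- abbreviations for the two halves produced by the sqrt loop
def smallPart (n : Int) : List Int :=
  (PySem.List.pyRange 1 (Int.sqrt n + 1)).filter (fun d => PySem.Int.mod n d == 0)

def largePart (n : Int) : List Int :=
  ((PySem.List.pyRange 1 (Int.sqrt n + 1)).filter
      (fun d => PySem.Int.mod n d == 0 && PySem.Int.floordiv n d != d)).map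
    (fun d => PySem.Int.floordiv n d)

lemma mem_smallPart {n x : Int} : x ∈ smallPart n ↔ (1 ≤ x ∧ x ≤ Int.sqrt n) ∧ x ∣ n := by
  simp [smallPart, List.mem_filter, PySem.List.mem_pyRange_one, PySem.Int.mod_eq_zero_iff_dvd]

lemma mem_largePart {n y : Int} (hn : 1 ≤ n) :
    y ∈ largePart n ↔ y ∣ n ∧ Int.sqrt n < y ∧ y ≤ n := by
  simp only [largePart, List.mem_map, List.mem_filter, PySem.List.mem_pyRange_one,
    Bool.and_eq_true, beq_iff_eq, bne_iff_ne, ne_eq, PySem.Int.mod_eq_zero_iff_dvd]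
  constructor
  · rintro ⟨d, ⟨⟨hd1, hd2⟩, hdvd, hne⟩, rfl⟩
    have hd1' : 1 ≤ d := hd1
    have hfd : PySem.Int.floordiv n d = n / d := PySem.Int.floordiv_eq_ediv_of_pos (by omega)
    have hmul : d * (n / d) = n := Int.mul_ediv_cancel' hdvd
    rw [hfd] at hne ⊢
    set y := n / d with hy
    have hy1 : 1 ≤ y := by nlinarith
    refine ⟨⟨d, by rw [← hmul]; ring⟩, ?_, ?_⟩
    · by_contra h
      push Not at h
      have hdd : d * d ≤ n := by nlinarith [sqrt_sq_le (by omega : (0:Int) ≤ n)]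
      have hyy : y * y ≤ n := by nlinarith [sqrt_sq_le (by omega : (0:Int) ≤ n)]
      have h1 : y ≤ d := by nlinarith
      have h2 : d ≤ y := by nlinarith
      omega
    · nlinarith
  · rintro ⟨hdvd, hgt, hle⟩
    have hs0 : 0 ≤ Int.sqrt n := Int.sqrt_nonneg n
    have hy1 : 1 ≤ y := by omega
    obtain ⟨d, hd⟩ := hdvd
    have hd1 : 1 ≤ d := by nlinarith
    have hyy : n < y * y := by nlinarith [lt_sqrt_succ_sq (by omega : (0:Int) ≤ n)]
    have hdy : d < y := by nlinarith
    have hdd : d * d ≤ n := by nlinarith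
    have hds : d ≤ Int.sqrt n := (le_sqrt_iff hd1).mpr hdd
    have hfd : PySem.Int.floordiv n d = n / d := PySem.Int.floordiv_eq_ediv_of_pos (by omega)
    have hnd : n / d = y := by
      have hdy' : n = d * y := by rw [hd]; ring
      rw [hdy', Int.mul_ediv_cancel_left _ (by omega : d ≠ 0)]
    exact ⟨d, ⟨⟨hd1, by omega⟩, ⟨y, by rw [hd]; ring⟩, by rw [hfd, hnd]; omega⟩, by rw [hfd, hnd]⟩

lemma pyDivisors_eq (n : Int) : pyDivisors n = ndiv n := by
  have hrw : pyDivisors n = smallPart n ++ (largePart n).reverse := by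
    unfold pyDivisors
    rw [divisorsAux_spec n (n + 1 - 1).toNat 1 (le_refl _) (le_refl _)]
    rfl
  by_cases hn : n ≤ 0
  · have h0 : Int.sqrt n = 0 := by
      unfold Int.sqrt
      rw [Int.toNat_of_nonpos hn]; simp
    rw [hrw]
    unfold smallPart largePart ndiv
    rw [h0]
    rw [PySem.List.pyRange_one_eq_nil (by omega), PySem.List.pyRange_one_eq_nil (by omega)]
    simp
  · push Not at hn
    -- n ≥ 1 : both are the sorted nodup list of divisors of n in [1, n]
    have hmemS : ∀ x, x ∈ smallPart n ↔ (1 ≤ x ∧ x ≤ Int.sqrt n) ∧ x ∣ n := fun x => mem_smallPart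
    have hmemL : ∀ y, y ∈ largePart n ↔ y ∣ n ∧ Int.sqrt n < y ∧ y ≤ n := fun y => mem_largePart hn
    have hs0 : 0 ≤ Int.sqrt n := Int.sqrt_nonneg n
    have hsn : Int.sqrt n ≤ n := by
      by_cases h : Int.sqrt n ≤ 0
      · omega
      · push Not at h
        nlinarith [sqrt_sq_le (by omega : (0:Int) ≤ n)]
    -- membership agreement
    have hmem : ∀ x, x ∈ smallPart n ++ (largePart n).reverse ↔ x ∈ ndiv n := by
      intro x
      rw [List.mem_append, List.mem_reverse, hmemS, hmemL, mem_ndiv]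
      constructor
      · rintro (⟨⟨h1, h2⟩, h3⟩ | ⟨h1, h2, h3⟩)
        · exact ⟨⟨h1, by omega⟩, h3⟩
        · exact ⟨⟨by omega, by omega⟩, h1⟩
      · rintro ⟨⟨h1, h2⟩, h3⟩
        by_cases h : x ≤ Int.sqrt n
        · exact Or.inl ⟨⟨h1, h⟩, h3⟩
        · push Not at h
          exact Or.inr ⟨h3, h, by omega⟩
    -- nodup on both sides
    have hndS : (smallPart n).Nodup := (PySem.List.nodup_pyRange_one _ _).filter _
    have hndL : (largePart n).Nodup := by
      unfold largePart
      apply List.Nodup.map_on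
      · intro d1 h1 d2 h2 heq
        simp only [List.mem_filter, PySem.List.mem_pyRange_one, Bool.and_eq_true, beq_iff_eq,
          PySem.Int.mod_eq_zero_iff_dvd] at h1 h2
        have hf1 : PySem.Int.floordiv n d1 = n / d1 :=
          PySem.Int.floordiv_eq_ediv_of_pos (by omega)
        have hf2 : PySem.Int.floordiv n d2 = n / d2 :=
          PySem.Int.floordiv_eq_ediv_of_pos (by omega)
        have hm1 : d1 * (n / d1) = n := Int.mul_ediv_cancel' h1.2.1
        have hm2 : d2 * (n / d2) = n := Int.mul_ediv_cancel' h2.2.1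
        rw [hf1, hf2] at heq
        have hy1 : 1 ≤ n / d1 := by nlinarith [h1.1.1]
        nlinarith [h1.1.1, h2.1.1]
      · exact (PySem.List.nodup_pyRange_one _ _).filter _
    have hnd1 : (smallPart n ++ (largePart n).reverse).Nodup := by
      rw [List.nodup_append]
      refine ⟨hndS, List.nodup_reverse.mpr hndL, ?_⟩
      intro x hx y hy
      rw [List.mem_reverse, hmemL] at hy
      rw [hmemS] at hx
      omega
    have hnd2 : (ndiv n).Nodup := (PySem.List.nodup_pyRange_one _ _).filter _
    -- sortedness (strictly increasing) on both sides
    have hsort1 : (smallPart n ++ (largePart n).reverse).Pairwise (· < ·) := by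
      rw [List.pairwise_append]
      refine ⟨(PySem.List.pairwise_lt_pyRange_one _ _).filter _, ?_, ?_⟩
      · rw [List.pairwise_reverse]
        unfold largePart
        rw [List.pairwise_map]
        apply List.Pairwise.imp_of_mem ?_
          ((PySem.List.pairwise_lt_pyRange_one _ _).filter _)
        intro d1 d2 h1 h2 hlt
        simp only [List.mem_filter, PySem.List.mem_pyRange_one, Bool.and_eq_true, beq_iff_eq,
          PySem.Int.mod_eq_zero_iff_dvd] at h1 h2
        have hf1 : PySem.Int.floordiv n d1 = n / d1 :=
          PySem.Int.floordiv_eq_ediv_of_pos (by omega)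
        have hf2 : PySem.Int.floordiv n d2 = n / d2 :=
          PySem.Int.floordiv_eq_ediv_of_pos (by omega)
        have hm1 : d1 * (n / d1) = n := Int.mul_ediv_cancel' h1.2.1
        have hm2 : d2 * (n / d2) = n := Int.mul_ediv_cancel' h2.2.1
        rw [hf1, hf2]
        have hy2 : 1 ≤ n / d2 := by nlinarith [h2.1.1]
        nlinarith [h1.1.1, h2.1.1]
      · intro x hx y hy
        rw [hmemS] at hx
        rw [List.mem_reverse, hmemL] at hy
        omega
    have hsort2 : (ndiv n).Pairwise (· < ·) :=
      (PySem.List.pairwise_lt_pyRange_one _ _).filter _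
    exact hrw ▸ List.Perm.eq_of_pairwise
      (fun a b _ _ h1 h2 => by omega) hsort1 hsort2
      ((List.perm_ext_iff_of_nodup hnd1 hnd2).mpr hmem)

lemma xor_divisors_filter (a b : Int) :
    xor_divisors a b =
      (ndiv a ++ ndiv b).filter
        (fun d => ((PySem.Int.mod a d == 0) && (PySem.Int.mod b d != 0)) ||
                  ((PySem.Int.mod a d != 0) && (PySem.Int.mod b d == 0))) := by
  unfold xor_divisors ndiv
  rw [PySem.List.foldl_append_if_eq_filter, PySem.List.foldl_append_if_eq_filter,
    PySem.List.foldl_append_if_eq_filter]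
  simp

lemma main_eq (a b : Int) : xor_divisors a b = xor_divisors_alt a b := by
  rw [xor_divisors_filter, List.filter_append]
  unfold xor_divisors_alt
  rw [pyDivisors_eq a, pyDivisors_eq b]
  congr 1
  · apply List.filter_congr
    intro x hx
    have hx0 : PySem.Int.mod a x = 0 := by
      rw [PySem.Int.mod_eq_zero_iff_dvd]
      exact (mem_ndiv.mp hx).2
    simp [hx0]
  · apply List.filter_congr
    intro x hx
    have hx0 : PySem.Int.mod b x = 0 := by
      rw [PySem.Int.mod_eq_zero_iff_dvd]
      exact (mem_ndiv.mp hx).2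
    simp [hx0]

-- ===== VERDICT (by name: the statement is the Claim_ definition above) =====
theorem xor_divisors_spec : Claim_equal_xor_divisors := by
  intro a b _
  unfold Spec_xor_divisors
  exact main_eq a b
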